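-- pv_equiv track=rewrite | github.com/Se7enSquared/PyBitesRepo | 189/control_flow.py | filter_names
-- ===== SOURCE A (Python) =====
-- IGNORE_CHAR = 'b'
--
-- QUIT_CHAR = 'q'
--
-- MAX_NAMES = 5
--
-- def filter_names(names):
--     filtered_list = []
--     for name in names:
--         if name.startswith(QUIT_CHAR):
--             break
--         if len(filtered_list) < MAX_NAMES:
--             if not name.startswith(IGNORE_CHAR):
--                 if not _has_digit(name):
--                     filtered_list.append(name)
--     return filtered_list
--
-- def _has_digit(name):
--     has_digit = False
--     for char in name:
--         if char.isdigit():
--             has_digit = True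
--     return has_digit
-- ===== SOURCE B (Python) =====
-- IGNORE_CHAR = 'b'
--
-- QUIT_CHAR = 'q'
--
-- MAX_NAMES = 5
--
-- _DIGITS = set('0123456789')
--
--
-- def filter_names(names):
--     return _pick(names, MAX_NAMES)
--
--
-- def _pick(names, budget):
--     # recursive: stop as soon as the budget is exhausted or a quit name appears
--     if budget == 0 or not names:
--         return []
--     name, rest = names[0], names[1:]
--     if name.startswith(QUIT_CHAR):
--         return []
--     if name.startswith(IGNORE_CHAR) or (_DIGITS & set(name)):
--         return _pick(rest, budget)
--     return [name] + _pick(rest, budget - 1)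
-- ===== Notes on version B (the rewrite author's own statement) =====
-- stated objective: alternative
-- what changed: Replaced A's iterative loop with counter, break and flag-loop digit test by a recursive descent carrying a remaining-budget argument that builds the result by cons and terminates outright once the budget is exhausted (A keeps scanning after the 5th kept name), with the digit test done by set intersection against a precomputed digit set instead of A's character flag-loop.
import Mathlib
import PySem

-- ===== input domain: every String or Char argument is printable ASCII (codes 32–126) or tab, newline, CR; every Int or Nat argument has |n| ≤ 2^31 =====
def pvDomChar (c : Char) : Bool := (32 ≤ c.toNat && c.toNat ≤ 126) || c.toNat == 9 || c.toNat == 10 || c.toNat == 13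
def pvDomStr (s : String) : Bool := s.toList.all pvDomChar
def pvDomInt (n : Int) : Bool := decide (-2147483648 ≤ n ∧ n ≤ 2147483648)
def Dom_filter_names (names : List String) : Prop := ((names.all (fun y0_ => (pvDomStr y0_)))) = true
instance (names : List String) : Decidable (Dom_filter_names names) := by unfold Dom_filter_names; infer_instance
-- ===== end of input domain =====

-- B replaces A's loop (counter, break, digit flag-loop) by a recursive descent with a remaining-budget
-- argument that conses the result and stops when the budget is gone; digit test by set intersection.

-- ===== PORT A =====
-- _has_digit: flag loop over the characters
def pvHasDigit (name : String) : Bool :=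
  name.toList.foldl (fun hd c => if PySem.Chars.isdigit c then true else hd) false

-- the for-loop with break and the length-bounded append, as structural recursion over names
def pvGoA : List String → List String → List String
  | [], acc => acc
  | n :: rest, acc =>
    if PySem.Str.startswith n "q" then acc
    else if acc.length < 5 then
      if ¬ PySem.Str.startswith n "b" then
        if ¬ pvHasDigit n then pvGoA rest (acc ++ [n]) else pvGoA rest acc
      else pvGoA rest acc
    else pvGoA rest acc

def filter_names (names : List String) : List String := pvGoA names []

-- ===== PORT B =====
def pvDigits : List Char := ['0','1','2','3','4','5','6','7','8','9']

-- truthiness of the set intersection _DIGITS & set(name): some distinct character of name is a digit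
def pvDigitsIn (n : String) : Bool :=
  (PySem.Set.ofList n.toList).any (fun c => pvDigits.contains c)

-- _pick: recursion on (names, budget), consing kept names, stopping at budget 0 or a quit name
def pvPick : List String → Nat → List String
  | _, 0 => []
  | [], _ + 1 => []
  | name :: rest, budget + 1 =>
    if PySem.Str.startswith name "q" then []
    else if PySem.Str.startswith name "b" || pvDigitsIn name then pvPick rest (budget + 1)
    else name :: pvPick rest budget

def filter_names_alt (names : List String) : List String := pvPick names 5

-- ===== PRECONDITION & SPEC =====
def Spec_filter_names (names : List String) (out : List String) : Prop := out = filter_names_alt names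
instance (names : List String) (out : List String) : Decidable (Spec_filter_names names out) := by unfold Spec_filter_names; infer_instance

-- ===== CLAIM (what is proved, stated in full; the proofs are below) =====
def Claim_equal_filter_names : Prop := ∀ (names : List String), Dom_filter_names names → Spec_filter_names names (filter_names names)

-- ===== LEMMAS AND PROOFS =====

-- the common reference value: kept names of the pre-quit prefix, limited to 5
def pvKeep (n : String) : Bool :=
  !PySem.Str.startswith n "b" && !(n.toList.any PySem.Chars.isdigit)

def pvRef (names : List String) (k : Nat) : List String :=
  ((names.takeWhile (fun n => !PySem.Str.startswith n "q")).filter pvKeep).take k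

theorem pvHasDigit_eq_any (n : String) : pvHasDigit n = n.toList.any PySem.Chars.isdigit := by
  unfold pvHasDigit
  rw [PySem.List.foldl_if_true_eq]
  simp

theorem pvDigits_mem (c : Char) : (pvDigits.contains c) = PySem.Chars.isdigit c := by
  simp only [pvDigits, PySem.Chars.isdigit, List.contains_eq_mem, List.mem_cons, List.not_mem_nil, or_false]
  rcases c with ⟨v, hv⟩
  simp only [Char.ext_iff, Char.le_def, UInt32.le_iff_toNat_le, UInt32.ext_iff]
  by_cases h : 48 ≤ v.toNat ∧ v.toNat ≤ 57
  · have : v.toNat = 48 ∨ v.toNat = 49 ∨ v.toNat = 50 ∨ v.toNat = 51 ∨ v.toNat = 52 ∨ v.toNat = 53 ∨ v.toNat = 54 ∨ v.toNat = 55 ∨ v.toNat = 56 ∨ v.toNat = 57 := by omega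
    simp_all
  · rw [Bool.eq_iff_iff]
    simp only [decide_eq_true_eq, Bool.and_eq_true,
      show ('0'.val.toNat) = 48 from rfl, show ('1'.val.toNat) = 49 from rfl,
      show ('2'.val.toNat) = 50 from rfl, show ('3'.val.toNat) = 51 from rfl,
      show ('4'.val.toNat) = 52 from rfl, show ('5'.val.toNat) = 53 from rfl,
      show ('6'.val.toNat) = 54 from rfl, show ('7'.val.toNat) = 55 from rfl,
      show ('8'.val.toNat) = 56 from rfl, show ('9'.val.toNat) = 57 from rfl]
    omega

theorem pvDigitsIn_eq_any (n : String) : pvDigitsIn n = n.toList.any PySem.Chars.isdigit := by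
  unfold pvDigitsIn
  rw [Bool.eq_iff_iff]
  simp only [List.any_eq_true, PySem.Set.mem_ofList, pvDigits_mem]

theorem pvGoA_eq (ns : List String) : ∀ acc : List String,
    pvGoA ns acc = acc ++ pvRef ns (5 - acc.length) := by
  induction ns with
  | nil => intro acc; simp [pvGoA, pvRef]
  | cons n rest ih =>
    intro acc
    cases hq : PySem.Chars.startswith n.toList ['q'] with
    | true => simp [pvGoA, pvRef, hq]
    | false =>
      cases hb : PySem.Chars.startswith n.toList ['b'] with
      | true =>
        have hacc : pvKeep n = false := by simp [pvKeep, hb]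
        simp [pvGoA, pvRef, hq, hb, hacc, ih]
      | false =>
        cases hd : pvHasDigit n with
        | true =>
          have hacc : pvKeep n = false := by
            have := hd
            rw [pvHasDigit_eq_any] at this
            simp [pvKeep, hb, this]
          simp [pvGoA, pvRef, hq, hb, hd, hacc, ih]
        | false =>
          have hacc : pvKeep n = true := by
            have := hd
            rw [pvHasDigit_eq_any] at this
            simp [pvKeep, hb, this]
          by_cases hlen : acc.length < 5
          · obtain ⟨k, hk⟩ : ∃ k, 5 - acc.length = k + 1 := ⟨5 - acc.length - 1, by omega⟩
            have hk' : 4 - acc.length = k := by omega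
            simp [pvGoA, pvRef, hq, hb, hd, hlen, hacc, ih, hk, hk']
          · have h0 : 5 - acc.length = 0 := by omega
            simp [pvGoA, pvRef, hq, hlen, hacc, ih, h0]

theorem pvPick_eq (ns : List String) : ∀ k : Nat, pvPick ns k = pvRef ns k := by
  induction ns with
  | nil => intro k; cases k <;> simp [pvPick, pvRef]
  | cons n rest ih =>
    intro k
    cases k with
    | zero => simp [pvPick, pvRef]
    | succ k =>
      cases hq : PySem.Chars.startswith n.toList ['q'] with
      | true => simp [pvPick, pvRef, PySem.Str.startswith, hq]
      | false =>
        cases hb : PySem.Chars.startswith n.toList ['b'] with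
        | true =>
          have hacc : pvKeep n = false := by simp [pvKeep, hb]
          simp [pvPick, pvRef, PySem.Str.startswith, hq, hb, hacc, ih]
        | false =>
          cases hdg : pvDigitsIn n with
          | true =>
            have hd : n.toList.any PySem.Chars.isdigit = true := by
              rw [← pvDigitsIn_eq_any]; exact hdg
            have hacc : pvKeep n = false := by simp [pvKeep, hd]
            simp [pvPick, pvRef, PySem.Str.startswith, hq, hb, hdg, hacc, ih]
          | false =>
            have hd : n.toList.any PySem.Chars.isdigit = false := by
              rw [← pvDigitsIn_eq_any]; exact hdg
            have hacc : pvKeep n = true := by simp [pvKeep, hb, hd]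
            simp [pvPick, pvRef, PySem.Str.startswith, hq, hb, hdg, hacc, ih]

-- ===== VERDICT (by name: the statement is the Claim_ definition above) =====
theorem filter_names_spec : Claim_equal_filter_names := by
  intro names _
  unfold Spec_filter_names filter_names filter_names_alt
  rw [pvPick_eq]
  simpa using pvGoA_eq names []
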